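-- pv_equiv track=rewrite | github.com/dathong/ProtoryNet | gen_sent_embeds.py | process_sents
-- ===== SOURCE A (Python) =====
-- def process_sents(sents):
-- 	count1, count2 = 0, 0
-- 	sent_list = []
-- 	p_to_sent = {}
-- 	sent_to_p = {}
-- 	for p in sents:
-- 		p_to_sent[count2] = []
-- 		for sent in p:
-- 			sent_list.append(sent)
-- 			p_to_sent[count2].append(count1)
-- 			sent_to_p[count1] = count2
-- 			count1+=1
-- 		count2+=1
-- 	return sent_list, p_to_sent, sent_to_p
-- ===== SOURCE B (Python) =====
-- def process_sents(sents):
--     ps = list(sents)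
--
--     def go(ps, c1, c2):
--         # paragraphs ps, first flat sentence index c1, first paragraph index c2
--         if not ps:
--             return [], {}, {}
--         if len(ps) == 1:
--             p = list(ps[0])
--             idxs = list(range(c1, c1 + len(p)))
--             return p, {c2: idxs}, {i: c2 for i in idxs}
--         mid = len(ps) // 2
--         sl_l, pts_l, stp_l = go(ps[:mid], c1, c2)
--         sl_r, pts_r, stp_r = go(ps[mid:], c1 + len(sl_l), c2 + mid)
--         return sl_l + sl_r, {**pts_l, **pts_r}, {**stp_l, **stp_r}
--
--     return go(ps, 0, 0)
-- ===== Notes on version B (the rewrite author's own statement) =====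
-- stated objective: alternative
-- what changed: B replaces A's single forward pass with mutable counters and per-sentence dict writes by a divide-and-conquer recursion: it splits the paragraph list in half, builds each half's flat list and both index maps independently from the half's starting offsets (whole index ranges at a time), and merges the disjoint-key results with dict unpacking.
import Mathlib
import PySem

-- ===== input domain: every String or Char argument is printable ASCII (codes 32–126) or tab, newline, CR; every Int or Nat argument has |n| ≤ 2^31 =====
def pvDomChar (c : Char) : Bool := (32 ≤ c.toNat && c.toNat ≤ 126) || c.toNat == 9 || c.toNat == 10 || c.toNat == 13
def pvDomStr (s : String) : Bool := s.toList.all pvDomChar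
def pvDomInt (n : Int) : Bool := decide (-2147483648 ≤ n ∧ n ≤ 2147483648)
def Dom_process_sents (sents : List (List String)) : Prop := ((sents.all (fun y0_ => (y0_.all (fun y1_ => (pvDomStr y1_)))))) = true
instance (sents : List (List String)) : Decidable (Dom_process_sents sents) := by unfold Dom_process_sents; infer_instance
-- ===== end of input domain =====

-- B replaces A's single forward pass with mutable counters by a divide-and-conquer recursion that
-- builds each half's flat list and index maps from the half's starting offsets and merges them;
-- objective: alternative decomposition (same asymptotic work, no speed claim).

-- ===== PORT A =====
-- inner 'for sent in p' loop; state (count1, sent_list, p_to_sent, sent_to_p)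
def psA_inner (count2 : Int) :
    List String → Int → List String → PySem.Dict Int (List Int) → PySem.Dict Int Int →
    Int × List String × PySem.Dict Int (List Int) × PySem.Dict Int Int
  | [], c1, sl, pts, stp => (c1, sl, pts, stp)
  | sent :: rest, c1, sl, pts, stp =>
      psA_inner count2 rest (c1 + 1) (sl ++ [sent])
        (pts.modify count2 [] (fun l => l ++ [c1])) (stp.insert c1 count2)

-- outer 'for p in sents' loop; state (count1, count2, sent_list, p_to_sent, sent_to_p)
def psA_outer :
    List (List String) → Int → Int → List String → PySem.Dict Int (List Int) → PySem.Dict Int Int →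
    Int × Int × List String × PySem.Dict Int (List Int) × PySem.Dict Int Int
  | [], c1, c2, sl, pts, stp => (c1, c2, sl, pts, stp)
  | p :: rest, c1, c2, sl, pts, stp =>
      match psA_inner c2 p c1 sl (pts.insert c2 []) stp with
      | (c1', sl', pts', stp') => psA_outer rest c1' (c2 + 1) sl' pts' stp'

def process_sents (sents : List (List String)) : List String × (List (Int × List Int)) × (List (Int × Int)) :=
  match psA_outer sents 0 0 [] PySem.Dict.empty PySem.Dict.empty with
  | (_, _, sl, pts, stp) => (sl, pts.items, stp.items)

-- ===== PORT B =====
-- divide-and-conquer 'go(ps, c1, c2)': split at mid = len(ps)//2, recurse, merge with dict unpacking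
-- ({**l, **r} = copy l, then insert r's items in order)
def psB_go (ps : List (List String)) (c1 c2 : Int) :
    List String × PySem.Dict Int (List Int) × PySem.Dict Int Int :=
  match ps with
  | [] => ([], PySem.Dict.empty, PySem.Dict.empty)
  | [p] =>
      let idxs := PySem.List.pyRange c1 (c1 + p.length) 1
      (p, PySem.Dict.empty.insert c2 idxs,
       idxs.foldl (fun d i => d.insert i c2) PySem.Dict.empty)
  | p :: q :: rest =>
      let mid := (p :: q :: rest).length / 2   -- len(ps)//2 on a nonneg length: Nat division is exact here
      let L := psB_go ((p :: q :: rest).take mid) c1 c2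
      let R := psB_go ((p :: q :: rest).drop mid) (c1 + L.1.length) (c2 + mid)
      (L.1 ++ R.1,
       R.2.1.items.foldl (fun d kv => d.insert kv.1 kv.2) L.2.1,
       R.2.2.items.foldl (fun d kv => d.insert kv.1 kv.2) L.2.2)
  termination_by ps.length
  decreasing_by
  · simp [List.length_take]; omega
  · simp; omega

def process_sents_alt (sents : List (List String)) : List String × (List (Int × List Int)) × (List (Int × Int)) :=
  match psB_go sents 0 0 with
  | (sl, pts, stp) => (sl, pts.items, stp.items)

-- ===== PRECONDITION & SPEC =====
def Spec_process_sents (sents : List (List String)) (out : List String × (List (Int × List Int)) × (List (Int × Int))) : Prop := out = process_sents_alt sents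
instance (sents : List (List String)) (out : List String × (List (Int × List Int)) × (List (Int × Int))) : Decidable (Spec_process_sents sents out) := by unfold Spec_process_sents; infer_instance

-- ===== CLAIM (what is proved, stated in full; the proofs are below) =====
def Claim_equal_process_sents : Prop := ∀ (sents : List (List String)), Dom_process_sents sents → Spec_process_sents sents (process_sents sents)

-- ===== LEMMAS AND PROOFS =====

-- the common shape of p_to_sent's items: one (paragraph index, flat-index range) pair per paragraph
def ptsSpec : List (List String) → Int → Int → List (Int × List Int)
  | [], _, _ => []
  | p :: rest, c1, c2 =>
      (c2, PySem.List.pyRange c1 (c1 + p.length) 1) :: ptsSpec rest (c1 + p.length) (c2 + 1)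

-- the common shape of sent_to_p's items: (flat index, paragraph index) for each sentence
def stpSpec : List (List String) → Int → Int → List (Int × Int)
  | [], _, _ => []
  | p :: rest, c1, c2 =>
      (PySem.List.pyRange c1 (c1 + p.length) 1).map (fun i => (i, c2)) ++ stpSpec rest (c1 + p.length) (c2 + 1)

theorem ptsSpec_keys (ps : List (List String)) : ∀ c1 c2 : Int,
    (ptsSpec ps c1 c2).map (·.1) = PySem.List.pyRange c2 (c2 + ps.length) 1 := by
  induction ps with
  | nil => intro c1 c2; simp [ptsSpec, PySem.List.pyRange_one_eq_nil]
  | cons p rest ih =>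
      intro c1 c2
      rw [PySem.List.pyRange_one_cons (by push_cast [List.length_cons]; omega)]
      simp only [ptsSpec, List.map_cons, ih]
      congr 2
      push_cast [List.length_cons]; omega

theorem stpSpec_keys (ps : List (List String)) : ∀ c1 c2 : Int,
    (stpSpec ps c1 c2).map (·.1) = PySem.List.pyRange c1 (c1 + ps.flatten.length) 1 := by
  induction ps with
  | nil => intro c1 c2; simp [stpSpec, PySem.List.pyRange_one_eq_nil]
  | cons p rest ih =>
      intro c1 c2
      rw [PySem.List.pyRange_one_append c1 (c1 + p.length) (c1 + ((p :: rest).flatten.length : Nat))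
        (by omega) (by push_cast [List.length_cons, List.flatten_cons, List.length_append]; omega)]
      simp only [stpSpec, List.map_append, List.map_map, ih]
      have hmap : ((fun x : Int × Int => x.1) ∘ fun i : Int => (i, c2)) = id := rfl
      simp only [hmap, List.map_id, List.flatten_cons, List.length_append, Nat.cast_add]
      ring_nf

theorem ptsSpec_append (xs ys : List (List String)) : ∀ c1 c2 : Int,
    ptsSpec (xs ++ ys) c1 c2 =
      ptsSpec xs c1 c2 ++ ptsSpec ys (c1 + xs.flatten.length) (c2 + xs.length) := by
  induction xs with
  | nil => intro c1 c2; simp [ptsSpec]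
  | cons p rest ih =>
      intro c1 c2
      simp only [List.cons_append, ptsSpec, ih]
      simp only [List.flatten_cons, List.length_append, List.length_cons, Nat.cast_add, Nat.cast_one]
      ring_nf

theorem stpSpec_append (xs ys : List (List String)) : ∀ c1 c2 : Int,
    stpSpec (xs ++ ys) c1 c2 =
      stpSpec xs c1 c2 ++ stpSpec ys (c1 + xs.flatten.length) (c2 + xs.length) := by
  induction xs with
  | nil => intro c1 c2; simp [stpSpec]
  | cons p rest ih =>
      intro c1 c2
      simp only [List.cons_append, stpSpec, ih, List.append_assoc]
      congr 3 <;> push_cast [List.length_cons, List.flatten_cons, List.length_append] <;> omega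

-- d[k] = f(d.get(k, d0)) right after d[k] = v is d[k] = f(v)
theorem modify_insert_self {κ ν : Type} [BEq κ] [LawfulBEq κ]
    (d : PySem.Dict κ ν) (k : κ) (v d0 : ν) (f : ν → ν) :
    (d.insert k v).modify k d0 f = d.insert k (f v) := by
  unfold PySem.Dict.modify
  rw [PySem.Dict.getD_insert_self, PySem.Dict.insert_insert_self]

-- A's inner sentence loop, in closed form over the flat-index range
theorem psA_inner_eq (p : List String) :
    ∀ (c1 c2 : Int) (v : List Int) (sl : List String)
      (pts : PySem.Dict Int (List Int)) (stp : PySem.Dict Int Int),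
    psA_inner c2 p c1 sl (pts.insert c2 v) stp =
      (c1 + p.length, sl ++ p,
       pts.insert c2 (v ++ PySem.List.pyRange c1 (c1 + p.length) 1),
       (PySem.List.pyRange c1 (c1 + p.length) 1).foldl (fun d i => d.insert i c2) stp) := by
  induction p with
  | nil => intro c1 c2 v sl pts stp; simp [psA_inner, PySem.List.pyRange]
  | cons s rest ih =>
      intro c1 c2 v sl pts stp
      have hr : PySem.List.pyRange c1 (c1 + ((s :: rest).length : Nat)) 1 =
          c1 :: PySem.List.pyRange (c1 + 1) (c1 + ((s :: rest).length : Nat)) 1 := by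
        apply PySem.List.pyRange_one_cons; simp
      have hlen : c1 + ((s :: rest).length : Nat) = (c1 + 1) + (rest.length : Nat) := by
        simp; omega
      simp only [psA_inner, modify_insert_self]
      rw [hr, hlen, ih]
      simp

-- a key outside the range a dict's keys form is absent
theorem contains_false_of_keys_range {ν : Type} (d : PySem.Dict Int ν) (a b k : Int)
    (hk : d.keys = PySem.List.pyRange a b 1) (h : ¬ (a ≤ k ∧ k < b)) :
    d.contains k = false := by
  rw [PySem.Dict.contains_eq_decide_mem_keys, hk]
  simp only [decide_eq_false_iff_not, PySem.List.mem_pyRange_one]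
  omega

-- A's outer loop: starting from dicts whose keys are exactly the index ranges already assigned,
-- it appends the spec items for the remaining paragraphs
theorem psA_outer_spec (ps : List (List String)) : ∀ (c1 c2 : Int) (sl : List String)
    (pts : PySem.Dict Int (List Int)) (stp : PySem.Dict Int Int) (b1 b2 : Int),
    b1 ≤ c1 → b2 ≤ c2 →
    pts.keys = PySem.List.pyRange b2 c2 1 → stp.keys = PySem.List.pyRange b1 c1 1 →
    (psA_outer ps c1 c2 sl pts stp).2.2.1 = sl ++ ps.flatten ∧
    (psA_outer ps c1 c2 sl pts stp).2.2.2.1.items = pts.items ++ ptsSpec ps c1 c2 ∧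
    (psA_outer ps c1 c2 sl pts stp).2.2.2.2.items = stp.items ++ stpSpec ps c1 c2 := by
  induction ps with
  | nil => intro c1 c2 sl pts stp b1 b2 hb1 hb2 hk1 hk2; simp [psA_outer, ptsSpec, stpSpec]
  | cons p rest ih =>
      intro c1 c2 sl pts stp b1 b2 hb1 hb2 hk1 hk2
      have hc2 : pts.contains c2 = false :=
        contains_false_of_keys_range pts b2 c2 c2 hk1 (by omega)
      have hfresh : ∀ i ∈ PySem.List.pyRange c1 (c1 + (p.length : Nat)) 1,
          stp.contains i = false := by
        intro i hi
        rw [PySem.List.mem_pyRange_one] at hi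
        exact contains_false_of_keys_range stp b1 c1 i hk2 (by omega)
      have hpts' : (pts.insert c2 (PySem.List.pyRange c1 (c1 + (p.length : Nat)) 1)).items =
          pts.items ++ [(c2, PySem.List.pyRange c1 (c1 + (p.length : Nat)) 1)] :=
        PySem.Dict.items_insert_of_not_contains pts _ hc2
      have hstp' : ((PySem.List.pyRange c1 (c1 + (p.length : Nat)) 1).foldl
            (fun d i => d.insert i c2) stp).items =
          stp.items ++ (PySem.List.pyRange c1 (c1 + (p.length : Nat)) 1).map (fun i => (i, c2)) := by
        have := PySem.Dict.items_foldl_insert_fresh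
          (PySem.List.pyRange c1 (c1 + (p.length : Nat)) 1)
          (fun i => i) (fun _ => c2) stp
          (by intro a ha; exact hfresh a ha)
          (by simpa using PySem.List.nodup_pyRange_one c1 (c1 + (p.length : Nat)))
        simpa using this
      have hk1' : (pts.insert c2 (PySem.List.pyRange c1 (c1 + (p.length : Nat)) 1)).keys =
          PySem.List.pyRange b2 (c2 + 1) 1 := by
        simp only [PySem.Dict.keys, hpts', List.map_append, List.map_cons, List.map_nil]
        rw [← PySem.Dict.keys, hk1, ← PySem.List.pyRange_one_succ_right hb2]
      have hk2' : ((PySem.List.pyRange c1 (c1 + (p.length : Nat)) 1).foldl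
            (fun d i => d.insert i c2) stp).keys =
          PySem.List.pyRange b1 (c1 + (p.length : Nat)) 1 := by
        have hmap : ((fun x : Int × Int => x.1) ∘ fun i : Int => (i, c2)) = id := rfl
        simp only [PySem.Dict.keys, hstp', List.map_append, List.map_map, hmap, List.map_id]
        rw [← PySem.Dict.keys, hk2]
        exact (PySem.List.pyRange_one_append b1 c1 (c1 + (p.length : Nat)) hb1 (by omega)).symm
      simp only [psA_outer]
      rw [psA_inner_eq p c1 c2 [] sl pts stp]
      simp only [List.nil_append]
      obtain ⟨h1, h2, h3⟩ := ih (c1 + (p.length : Nat)) (c2 + 1) (sl ++ p)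
        _ _ b1 b2 (by omega) (by omega) hk1' hk2'
      refine ⟨by rw [h1]; simp, by rw [h2, hpts']; simp [ptsSpec], by rw [h3, hstp']; simp [stpSpec]⟩

-- B's recursion computes the same spec items (strong induction on the number of paragraphs)
theorem psB_go_spec_aux : ∀ (n : Nat) (ps : List (List String)), ps.length ≤ n → ∀ c1 c2 : Int,
    (psB_go ps c1 c2).1 = ps.flatten ∧
    (psB_go ps c1 c2).2.1.items = ptsSpec ps c1 c2 ∧
    (psB_go ps c1 c2).2.2.items = stpSpec ps c1 c2 := by
  intro n
  induction n with
  | zero =>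
      intro ps h c1 c2
      have : ps = [] := List.length_eq_zero_iff.mp (Nat.le_zero.mp h)
      subst this
      rw [psB_go]
      exact ⟨rfl, rfl, rfl⟩
  | succ n ih =>
      intro ps h c1 c2
      match ps with
      | [] => rw [psB_go]; exact ⟨rfl, rfl, rfl⟩
      | [p] =>
          have h1 : (PySem.Dict.empty.insert c2
              (PySem.List.pyRange c1 (c1 + (p.length : Nat)) 1)).items =
              [(c2, PySem.List.pyRange c1 (c1 + (p.length : Nat)) 1)] := by
            rw [PySem.Dict.items_insert_of_not_contains _ _ (PySem.Dict.contains_empty c2)]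
            rfl
          have h2 : ((PySem.List.pyRange c1 (c1 + (p.length : Nat)) 1).foldl
                (fun d i => d.insert i c2) PySem.Dict.empty).items =
              (PySem.List.pyRange c1 (c1 + (p.length : Nat)) 1).map (fun i => (i, c2)) := by
            have := PySem.Dict.items_foldl_insert_fresh
              (PySem.List.pyRange c1 (c1 + (p.length : Nat)) 1)
              (fun i => i) (fun _ => c2) PySem.Dict.empty
              (by intro a _; exact PySem.Dict.contains_empty a)
              (by simpa using PySem.List.nodup_pyRange_one c1 (c1 + (p.length : Nat)))
            simpa using this
          rw [psB_go]
          exact ⟨by simp, by rw [h1]; simp [ptsSpec], by rw [h2]; simp [stpSpec]⟩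
      | p :: q :: rest =>
          rw [psB_go]
          have hlen : (p :: q :: rest).length = rest.length + 2 := by simp
          have hmid1 : 1 ≤ (p :: q :: rest).length / 2 := by omega
          have hmid2 : (p :: q :: rest).length / 2 < (p :: q :: rest).length := by omega
          obtain ⟨l1, l2, l3⟩ := ih ((p :: q :: rest).take ((p :: q :: rest).length / 2))
            (by rw [List.length_take]; omega) c1 c2
          obtain ⟨r1, r2, r3⟩ := ih ((p :: q :: rest).drop ((p :: q :: rest).length / 2))
            (by rw [List.length_drop]; omega)
            (c1 + ((psB_go ((p :: q :: rest).take ((p :: q :: rest).length / 2)) c1 c2).1.length : Nat))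
            (c2 + (((p :: q :: rest).length / 2 : Nat) : Int))
          -- abbreviations
          set mid := (p :: q :: rest).length / 2 with hmid
          set T := (p :: q :: rest).take mid with hT
          set D := (p :: q :: rest).drop mid with hD
          set c1' := c1 + ((psB_go T c1 c2).1.length : Nat) with hc1'
          have hTlen : T.length = mid := by rw [hT, List.length_take]; omega
          have hc1'' : c1' = c1 + (T.flatten.length : Nat) := by rw [hc1', l1]
          have hTD : T ++ D = p :: q :: rest := List.take_append_drop _ _
          -- the left dict's keys and the right dict's keys are disjoint ranges
          have hLkeys : (psB_go T c1 c2).2.1.keys = PySem.List.pyRange c2 (c2 + mid) 1 := by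
            simp only [PySem.Dict.keys, l2]
            rw [ptsSpec_keys, hTlen]
          have hRfst : ((psB_go D c1' (c2 + (mid : Int))).2.1.items).map (·.1) =
              PySem.List.pyRange (c2 + (mid : Int)) (c2 + (mid : Int) + D.length) 1 := by
            rw [r2, ptsSpec_keys]
          have hLkeys2 : (psB_go T c1 c2).2.2.keys =
              PySem.List.pyRange c1 (c1 + (T.flatten.length : Nat)) 1 := by
            simp only [PySem.Dict.keys, l3]
            rw [stpSpec_keys]
          have hRfst2 : ((psB_go D c1' (c2 + (mid : Int))).2.2.items).map (·.1) =
              PySem.List.pyRange c1' (c1' + D.flatten.length) 1 := by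
            rw [r3, stpSpec_keys]
          -- merge p_to_sent
          have hm1 : ((psB_go D c1' (c2 + (mid : Int))).2.1.items.foldl
                (fun d kv => d.insert kv.1 kv.2) (psB_go T c1 c2).2.1).items =
              (psB_go T c1 c2).2.1.items ++ (psB_go D c1' (c2 + (mid : Int))).2.1.items := by
            have := PySem.Dict.items_foldl_insert_fresh
              ((psB_go D c1' (c2 + (mid : Int))).2.1.items)
              Prod.fst Prod.snd ((psB_go T c1 c2).2.1)
              (by
                intro a ha
                have hk : a.1 ∈ ((psB_go D c1' (c2 + (mid : Int))).2.1.items).map (·.1) :=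
                  List.mem_map_of_mem ha
                rw [hRfst, PySem.List.mem_pyRange_one] at hk
                exact contains_false_of_keys_range _ c2 (c2 + (mid : Int)) a.1 hLkeys (by omega))
              (by rw [hRfst]; exact PySem.List.nodup_pyRange_one _ _)
            simpa using this
          -- merge sent_to_p
          have hm2 : ((psB_go D c1' (c2 + (mid : Int))).2.2.items.foldl
                (fun d kv => d.insert kv.1 kv.2) (psB_go T c1 c2).2.2).items =
              (psB_go T c1 c2).2.2.items ++ (psB_go D c1' (c2 + (mid : Int))).2.2.items := by
            have := PySem.Dict.items_foldl_insert_fresh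
              ((psB_go D c1' (c2 + (mid : Int))).2.2.items)
              Prod.fst Prod.snd ((psB_go T c1 c2).2.2)
              (by
                intro a ha
                have hk : a.1 ∈ ((psB_go D c1' (c2 + (mid : Int))).2.2.items).map (·.1) :=
                  List.mem_map_of_mem ha
                rw [hRfst2, PySem.List.mem_pyRange_one] at hk
                exact contains_false_of_keys_range _ c1 (c1 + (T.flatten.length : Nat)) a.1 hLkeys2
                  (by rw [hc1''] at hk; omega))
              (by rw [hRfst2]; exact PySem.List.nodup_pyRange_one _ _)
            simpa using this
          refine ⟨?_, ?_, ?_⟩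
          · rw [l1, r1, ← List.flatten_append, hTD]
          · rw [hm1, l2, r2, hc1'', ← hTlen, ← ptsSpec_append, hTD]
          · rw [hm2, l3, r3, hc1'', ← hTlen, ← stpSpec_append, hTD]

theorem psB_go_spec (ps : List (List String)) (c1 c2 : Int) :
    (psB_go ps c1 c2).1 = ps.flatten ∧
    (psB_go ps c1 c2).2.1.items = ptsSpec ps c1 c2 ∧
    (psB_go ps c1 c2).2.2.items = stpSpec ps c1 c2 :=
  psB_go_spec_aux ps.length ps le_rfl c1 c2

theorem process_sents_eq_alt (sents : List (List String)) :
    process_sents sents = process_sents_alt sents := by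
  obtain ⟨a1, a2, a3⟩ := psA_outer_spec sents 0 0 [] PySem.Dict.empty PySem.Dict.empty 0 0
    le_rfl le_rfl
    (by simp [PySem.List.pyRange_one_eq_nil])
    (by simp [PySem.List.pyRange_one_eq_nil])
  obtain ⟨b1, b2, b3⟩ := psB_go_spec sents 0 0
  have hA : process_sents sents =
      ((psA_outer sents 0 0 [] PySem.Dict.empty PySem.Dict.empty).2.2.1,
       (psA_outer sents 0 0 [] PySem.Dict.empty PySem.Dict.empty).2.2.2.1.items,
       (psA_outer sents 0 0 [] PySem.Dict.empty PySem.Dict.empty).2.2.2.2.items) := rfl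
  have hB : process_sents_alt sents =
      ((psB_go sents 0 0).1, (psB_go sents 0 0).2.1.items, (psB_go sents 0 0).2.2.items) := rfl
  rw [hA, hB, a1, a2, a3, b1, b2, b3]
  rfl

-- ===== VERDICT (by name: the statement is the Claim_ definition above) =====
theorem process_sents_spec : Claim_equal_process_sents := by
  intro sents _
  unfold Spec_process_sents
  exact process_sents_eq_alt sents
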